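-- pv_equiv track=rewrite | github.com/Search-Engine-DSA-Project/Search-Engine | Flask_server/application.py | dynamic_content_addition
-- ===== SOURCE A (Python) =====
-- def dynamic_content_addition(index_addition, merged_index):
--     indexes = [index_addition, merged_index]
--     merged_index = {}
--     for inv_index in indexes:
--         for token, docs_ in inv_index.items():
--             if token not in merged_index:
--                 merged_index[token] = {}
--             merged_index[token].update(docs_)
--     return merged_index
-- ===== SOURCE B (Python) =====
-- def dynamic_content_addition(index_addition, merged_index):
--     order = list(index_addition)
--     seen = set(order)
--     for t in merged_index:
--         if t not in seen:
--             order.append(t)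
--             seen.add(t)
--     return {t: {**index_addition.get(t, {}), **merged_index.get(t, {})} for t in order}
-- ===== Notes on version B (the rewrite author's own statement) =====
-- stated objective: alternative
-- what changed: Replaces A's accumulator mutation (nested loop over both dicts, updating a growing result dict in place) with a key-driven construction: first compute the union key order (first dict's keys, then the second's unseen keys), then build the result in one comprehension that merges the two per-token doc maps by random-access lookup ({**a.get(t,{}), **b.get(t,{})}); the result dict is never mutated after creation.
import Mathlib
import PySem

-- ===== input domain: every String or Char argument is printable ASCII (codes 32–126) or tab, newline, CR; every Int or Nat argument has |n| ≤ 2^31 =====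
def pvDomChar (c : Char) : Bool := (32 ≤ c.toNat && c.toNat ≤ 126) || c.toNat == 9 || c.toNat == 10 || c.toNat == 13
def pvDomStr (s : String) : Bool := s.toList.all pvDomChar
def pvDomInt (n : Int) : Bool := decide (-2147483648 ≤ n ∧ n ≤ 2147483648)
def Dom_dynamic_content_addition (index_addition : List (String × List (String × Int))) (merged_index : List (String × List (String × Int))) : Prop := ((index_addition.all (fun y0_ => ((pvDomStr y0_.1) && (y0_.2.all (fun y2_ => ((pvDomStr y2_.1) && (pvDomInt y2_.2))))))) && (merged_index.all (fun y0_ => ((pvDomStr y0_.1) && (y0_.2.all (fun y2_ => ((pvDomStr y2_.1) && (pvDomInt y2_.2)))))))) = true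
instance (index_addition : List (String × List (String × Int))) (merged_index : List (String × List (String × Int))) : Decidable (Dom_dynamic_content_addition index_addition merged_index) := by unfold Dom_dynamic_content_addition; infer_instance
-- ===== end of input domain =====

-- B change, one line: instead of A's accumulator mutation (nested loop over both dicts updating a
-- growing result dict in place), B first computes the union key order and then builds the result
-- in one comprehension merging the two per-token doc maps by lookup (objective: alternative).

-- shared input conversion: the Python arguments are dicts of dicts; the assoc-list arguments
-- are read as Python builds a dict from pairs (later duplicate keys overwrite, first position kept)
def pvToIndex (xs : List (String × List (String × Int))) : PySem.Dict String (PySem.Dict String Int) :=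
  PySem.Dict.ofList (xs.map (fun p => (p.1, PySem.Dict.ofList p.2)))

-- ===== PORT A =====
def dynamic_content_addition (index_addition : List (String × List (String × Int))) (merged_index : List (String × List (String × Int))) : List (String × List (String × Int)) :=
  let indexes := [pvToIndex index_addition, pvToIndex merged_index]
  let merged :=
    indexes.foldl (fun merged inv_index =>
      inv_index.items.foldl (fun merged td =>
        -- if token not in merged_index: merged_index[token] = {}
        let m1 := if merged.contains td.1 then merged else merged.insert td.1 PySem.Dict.empty
        -- merged_index[token].update(docs_)  (in-place update = overwrite at the key's position)
        m1.insert td.1 ((m1.getD td.1 PySem.Dict.empty).update td.2.items)) merged)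
      PySem.Dict.empty
  merged.items.map (fun p => (p.1, p.2.items))

-- ===== PORT B =====
def dynamic_content_addition_alt (index_addition : List (String × List (String × Int))) (merged_index : List (String × List (String × Int))) : List (String × List (String × Int)) :=
  let ia := pvToIndex index_addition
  let mi := pvToIndex merged_index
  -- order = list(index_addition); seen = set(order)
  let order := ia.keys
  let seen := PySem.Set.ofList order
  -- for t in merged_index: if t not in seen: order.append(t); seen.add(t)
  let os := mi.keys.foldl (fun (p : List String × PySem.Set String) t =>
      if PySem.Set.contains p.2 t then p else (p.1 ++ [t], PySem.Set.add p.2 t)) (order, seen)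
  -- {t: {**index_addition.get(t, {}), **merged_index.get(t, {})} for t in order}
  let res := PySem.Dict.ofList (os.1.map (fun t => (t,
      (PySem.Dict.ofList (ia.getD t PySem.Dict.empty).items).update (mi.getD t PySem.Dict.empty).items)))
  res.items.map (fun p => (p.1, p.2.items))

-- ===== PRECONDITION & SPEC =====
def Spec_dynamic_content_addition (index_addition : List (String × List (String × Int))) (merged_index : List (String × List (String × Int))) (out : List (String × List (String × Int))) : Prop := out = dynamic_content_addition_alt index_addition merged_index
instance (index_addition : List (String × List (String × Int))) (merged_index : List (String × List (String × Int))) (out : List (String × List (String × Int))) : Decidable (Spec_dynamic_content_addition index_addition merged_index out) := by unfold Spec_dynamic_content_addition; infer_instance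

-- ===== CLAIM (what is proved, stated in full; the proofs are below) =====
def Claim_equal_dynamic_content_addition : Prop := ∀ (index_addition : List (String × List (String × Int))) (merged_index : List (String × List (String × Int))), Dom_dynamic_content_addition index_addition merged_index → Spec_dynamic_content_addition index_addition merged_index (dynamic_content_addition index_addition merged_index)

-- ===== LEMMAS AND PROOFS =====

-- A's loop body (branch + overwrite) equals a single modify, pointwise
theorem stepA_eq_modify (m : PySem.Dict String (PySem.Dict String Int))
    (td : String × PySem.Dict String Int) :
    (let m1 := if m.contains td.1 then m else m.insert td.1 PySem.Dict.empty
     m1.insert td.1 ((m1.getD td.1 PySem.Dict.empty).update td.2.items))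
    = m.modify td.1 PySem.Dict.empty (fun dd => dd.update td.2.items) := by
  by_cases h : m.contains td.1 = true
  · simp [h, PySem.Dict.modify]
  · simp only [PySem.Dict.modify, h, if_false, Bool.false_eq_true,
      PySem.Dict.getD_insert_self, PySem.Dict.insert_insert_self]
    rw [PySem.Dict.getD_of_not_contains _ _ (by simpa using h)]

-- ofList rebuilds a pair list with distinct keys unchanged
theorem items_ofList_of_nodup {ν : Type} (l : List (String × ν))
    (hnd : (l.map (fun p => p.1)).Nodup) :
    (PySem.Dict.ofList l).items = l := by
  have := PySem.Dict.items_foldl_insert_fresh (κ := String) (ν := ν)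
      l (fun a => a.1) (fun a => a.2) PySem.Dict.empty
      (fun a _ => PySem.Dict.contains_empty _) hnd
  simpa [PySem.Dict.ofList, PySem.Dict.update] using this

-- a dict with nodup keys is rebuilt unchanged by ofList of its items
theorem ofList_items_of_nodup (d : PySem.Dict String Int) (h : d.keys.Nodup) :
    PySem.Dict.ofList d.items = d := by
  apply PySem.Dict.ext
  exact items_ofList_of_nodup d.items (by simpa [PySem.Dict.keys] using h)

-- items of an updated dict come from the old dict or from the pair list
theorem mem_items_update {κ ν : Type} [BEq κ] [LawfulBEq κ]
    (xs : List (κ × ν)) (d : PySem.Dict κ ν) (p : κ × ν)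
    (hp : p ∈ (d.update xs).items) : p ∈ d.items ∨ p ∈ xs := by
  induction xs generalizing d with
  | nil => exact Or.inl hp
  | cons x xs ih =>
    have hp' : p ∈ ((d.insert x.1 x.2).update xs).items := hp
    rcases ih (d.insert x.1 x.2) hp' with h | h
    · rcases (PySem.Dict.mem_items_insert _ _ _ _).1 h with h | h
      · rw [Prod.mk.eta] at h; right; simp [h]
      · exact Or.inl h.1
    · exact Or.inr (List.mem_cons_of_mem _ h)

-- every inner dict of pvToIndex xs has nodup keys
theorem inner_nodup (xs : List (String × List (String × Int)))
    (p : String × PySem.Dict String Int) (hp : p ∈ (pvToIndex xs).items) :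
    p.2.keys.Nodup := by
  rcases mem_items_update _ _ _ hp with h | h
  · simp [PySem.Dict.empty] at h
  · rcases List.mem_map.1 h with ⟨q, _, hq⟩
    rw [← hq]
    exact PySem.Dict.nodup_keys_ofList _

-- a modify-fold over fresh keys with self-rebuilding values just appends the pairs
theorem build_fold (l : List (String × PySem.Dict String Int))
    (m : PySem.Dict String (PySem.Dict String Int))
    (hfresh : ∀ p ∈ l, m.contains p.1 = false)
    (hnd : (l.map (fun p => p.1)).Nodup)
    (hin : ∀ p ∈ l, PySem.Dict.ofList p.2.items = p.2) :
    l.foldl (fun m td => m.modify td.1 PySem.Dict.empty (fun dd => dd.update td.2.items)) m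
      = PySem.Dict.mk (m.items ++ l) := by
  induction l generalizing m with
  | nil => simp
  | cons x xs ih =>
    simp only [List.map_cons, List.nodup_cons] at hnd
    have hx : m.contains x.1 = false := hfresh x (List.mem_cons_self)
    have hstep : m.modify x.1 PySem.Dict.empty (fun dd => dd.update x.2.items)
        = PySem.Dict.mk (m.items ++ [x]) := by
      rw [PySem.Dict.modify, PySem.Dict.getD_of_not_contains _ _ hx]
      apply PySem.Dict.ext
      rw [PySem.Dict.items_insert_of_not_contains _ _ hx]
      have hv : PySem.Dict.ofList x.2.items = x.2 := hin x (List.mem_cons_self)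
      rw [show (PySem.Dict.empty.update x.2.items : PySem.Dict String Int)
            = PySem.Dict.ofList x.2.items from rfl, hv]
    have hfresh' : ∀ p ∈ xs,
        (PySem.Dict.mk (m.items ++ [x]) : PySem.Dict String (PySem.Dict String Int)).contains p.1 = false := by
      intro p hp
      have h1 : m.contains p.1 = false := hfresh p (List.mem_cons_of_mem _ hp)
      have h2 : x.1 ≠ p.1 := by
        intro hEq
        exact hnd.1 (by rw [hEq]; exact List.mem_map_of_mem hp)
      simp only [PySem.Dict.contains, List.any_eq_false] at h1 ⊢
      intro q hq
      rcases List.mem_append.1 hq with hq | hq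
      · exact h1 q hq
      · simp only [List.mem_singleton] at hq
        subst hq
        simpa using h2
    rw [List.foldl_cons, hstep, ih _ hfresh' hnd.2 (fun p hp => hin p (List.mem_cons_of_mem _ hp))]
    simp

-- A's first pass (over index_addition, from the empty dict) rebuilds pvToIndex index_addition
theorem first_pass (xs : List (String × List (String × Int))) :
    (pvToIndex xs).items.foldl
        (fun m td => m.modify td.1 PySem.Dict.empty (fun dd => dd.update td.2.items))
        PySem.Dict.empty
      = pvToIndex xs := by
  have hnd : ((pvToIndex xs).items.map (fun p => p.1)).Nodup := by
    have := PySem.Dict.nodup_keys_ofList (xs.map (fun p => (p.1, PySem.Dict.ofList p.2)))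
    simpa [PySem.Dict.keys, pvToIndex] using this
  have h := build_fold (pvToIndex xs).items PySem.Dict.empty
      (fun p _ => PySem.Dict.contains_empty _) hnd
      (fun p hp => ofList_items_of_nodup _ (inner_nodup xs p hp))
  rw [h]
  apply PySem.Dict.ext
  simp [PySem.Dict.empty]

-- second pass: looking up a key absent from the pair list is unchanged
theorem fold_getD_not_mem (l : List (String × PySem.Dict String Int))
    (m : PySem.Dict String (PySem.Dict String Int)) (k : String)
    (hk : k ∉ l.map (fun p => p.1)) :
    (l.foldl (fun m td => m.modify td.1 PySem.Dict.empty (fun dd => dd.update td.2.items)) m).getD k PySem.Dict.empty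
      = m.getD k PySem.Dict.empty := by
  induction l generalizing m with
  | nil => rfl
  | cons x xs ih =>
    simp only [List.map_cons, List.mem_cons, not_or] at hk
    rw [List.foldl_cons, ih _ hk.2, PySem.Dict.getD_modify_of_ne _ _ _ hk.1]

-- second pass: looking up a key the pair list carries (once) applies its update
theorem fold_getD_mem (l : List (String × PySem.Dict String Int))
    (m : PySem.Dict String (PySem.Dict String Int)) (k : String) (v : PySem.Dict String Int)
    (hnd : (l.map (fun p => p.1)).Nodup) (hmem : (k, v) ∈ l) :
    (l.foldl (fun m td => m.modify td.1 PySem.Dict.empty (fun dd => dd.update td.2.items)) m).getD k PySem.Dict.empty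
      = (m.getD k PySem.Dict.empty).update v.items := by
  induction l generalizing m with
  | nil => cases hmem
  | cons x xs ih =>
    simp only [List.map_cons, List.nodup_cons] at hnd
    rcases List.mem_cons.1 hmem with h | h
    · subst h
      rw [List.foldl_cons, fold_getD_not_mem _ _ _ hnd.1, PySem.Dict.getD_modify_self]
    · have hne : k ≠ x.1 := by
        intro hEq
        exact hnd.1 (hEq ▸ List.mem_map_of_mem h)
      rw [List.foldl_cons, ih _ hnd.2 h, PySem.Dict.getD_modify_of_ne _ _ _ hne]

-- B's seen/order pair fold: both components march in lockstep as Set.add folds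
theorem pair_fold (l s : List String) :
    l.foldl (fun (p : List String × PySem.Set String) t =>
        if PySem.Set.contains p.2 t then p else (p.1 ++ [t], PySem.Set.add p.2 t)) (s, s)
      = (PySem.Set.update s l, PySem.Set.update s l) := by
  induction l generalizing s with
  | nil => rfl
  | cons x xs ih =>
    rw [List.foldl_cons]
    by_cases h : PySem.Set.contains s x = true
    · rw [if_pos h]
      have : PySem.Set.add s x = s := by simpa [PySem.Set.add, PySem.Set.contains, List.contains_eq_mem] using h
      rw [show PySem.Set.update s (x :: xs) = PySem.Set.update (PySem.Set.add s x) xs from rfl, this]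
      exact ih s
    · rw [if_neg h]
      have : PySem.Set.add s x = s ++ [x] := by simp only [PySem.Set.add]; rw [if_neg h]
      rw [show PySem.Set.update s (x :: xs) = PySem.Set.update (PySem.Set.add s x) xs from rfl, this]
      exact ih (s ++ [x])

-- set(xs) of a duplicate-free list is the list itself
theorem ofList_self_of_nodup (s : List String) (h : s.Nodup) :
    PySem.Set.ofList s = s := by
  have aux : ∀ (l t : List String), l.Nodup → (∀ x ∈ l, x ∉ t) →
      l.foldl PySem.Set.add t = t ++ l := by
    intro l
    induction l with
    | nil => intro t _ _; simp
    | cons x xs ih =>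
      intro t hnd hdisj
      simp only [List.nodup_cons] at hnd
      have hadd : PySem.Set.add t x = t ++ [x] := by
        simp only [PySem.Set.add, PySem.Set.contains, List.contains_eq_mem, decide_eq_true_eq]
        rw [if_neg (hdisj x List.mem_cons_self)]
      rw [List.foldl_cons, hadd, ih (t ++ [x]) hnd.2 ?_]
      · simp
      · intro y hy
        simp only [List.mem_append, List.mem_singleton, not_or]
        exact ⟨hdisj y (List.mem_cons_of_mem _ hy), fun hEq => hnd.1 (hEq ▸ hy)⟩
  have := aux s [] h (by simp)
  simpa [PySem.Set.ofList, PySem.Set.empty] using this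

-- folding Set.add keeps the element list duplicate-free
theorem nodup_set_update (l s : List String) (h : s.Nodup) :
    (PySem.Set.update s l).Nodup := by
  induction l generalizing s with
  | nil => exact h
  | cons x xs ih =>
    rw [show PySem.Set.update s (x :: xs) = PySem.Set.update (PySem.Set.add s x) xs from rfl]
    apply ih
    by_cases hc : x ∈ s
    · have : PySem.Set.add s x = s := by
        simp only [PySem.Set.add, PySem.Set.contains, List.contains_eq_mem, decide_eq_true_eq]
        rw [if_pos hc]
      rwa [this]
    · have : PySem.Set.add s x = s ++ [x] := by
        simp only [PySem.Set.add, PySem.Set.contains, List.contains_eq_mem, decide_eq_true_eq]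
        rw [if_neg hc]
      rw [this]
      simp only [List.nodup_append, List.nodup_singleton, true_and, h]
      intro a ha b hb
      simp only [List.mem_singleton] at hb
      subst hb
      exact fun hEq => hc (hEq ▸ ha)

-- per key, A's second pass stores exactly B's per-token merged doc map
theorem second_pass_getD (ia mi : List (String × List (String × Int))) (t : String) :
    ((pvToIndex mi).items.foldl
        (fun m td => m.modify td.1 PySem.Dict.empty (fun dd => dd.update td.2.items))
        (pvToIndex ia)).getD t PySem.Dict.empty
      = ((pvToIndex ia).getD t PySem.Dict.empty).update ((pvToIndex mi).getD t PySem.Dict.empty).items := by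
  have hMnd : ((pvToIndex mi).items.map (fun p => p.1)).Nodup := by
    have := PySem.Dict.nodup_keys_ofList (mi.map (fun p => (p.1, PySem.Dict.ofList p.2)))
    simpa [PySem.Dict.keys, pvToIndex] using this
  by_cases hc : (pvToIndex mi).contains t = true
  · obtain ⟨v, hv⟩ : ∃ v, (pvToIndex mi).get? t = some v := by
      rw [PySem.Dict.contains_eq_isSome_get?] at hc
      exact Option.isSome_iff_exists.1 hc
    rw [fold_getD_mem _ _ _ v hMnd (PySem.Dict.mem_items_of_get?_eq_some _ hv),
      PySem.Dict.getD_of_get?_eq_some _ _ hv]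
  · have hc' : (pvToIndex mi).contains t = false := by simpa using hc
    have hmem : t ∉ (pvToIndex mi).items.map (fun p => p.1) := by
      intro hm
      exact hc ((PySem.Dict.contains_iff_mem_keys _ _).2 hm)
    rw [fold_getD_not_mem _ _ _ hmem, PySem.Dict.getD_of_not_contains _ _ hc']
    rfl

-- B's inner comprehension value {**a.get(t,{}), …} starts from a faithful copy of a.get(t,{})
theorem inner_copy (ia : List (String × List (String × Int))) (t : String) :
    PySem.Dict.ofList ((pvToIndex ia).getD t PySem.Dict.empty).items
      = (pvToIndex ia).getD t PySem.Dict.empty := by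
  by_cases hc : (pvToIndex ia).contains t = true
  · obtain ⟨v, hv⟩ : ∃ v, (pvToIndex ia).get? t = some v := by
      rw [PySem.Dict.contains_eq_isSome_get?] at hc
      exact Option.isSome_iff_exists.1 hc
    rw [PySem.Dict.getD_of_get?_eq_some _ _ hv]
    exact ofList_items_of_nodup v (inner_nodup ia (t, v) (PySem.Dict.mem_items_of_get?_eq_some _ hv))
  · rw [PySem.Dict.getD_of_not_contains _ _ (by simpa using hc)]
    rfl

-- ===== VERDICT (by name: the statement is the Claim_ definition above) =====
theorem dynamic_content_addition_spec : Claim_equal_dynamic_content_addition := by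
  intro ia mi _
  show _ = _
  unfold dynamic_content_addition dynamic_content_addition_alt
  simp only [List.foldl_cons, List.foldl_nil]
  have hstep : (fun (m : PySem.Dict String (PySem.Dict String Int)) (td : String × PySem.Dict String Int) =>
      let m1 := if m.contains td.1 then m else m.insert td.1 PySem.Dict.empty
      m1.insert td.1 ((m1.getD td.1 PySem.Dict.empty).update td.2.items))
      = (fun m td => m.modify td.1 PySem.Dict.empty (fun dd => dd.update td.2.items)) :=
    funext fun m => funext fun td => stepA_eq_modify m td
  rw [hstep, first_pass]
  have hAnd : (pvToIndex ia).keys.Nodup := PySem.Dict.nodup_keys_ofList _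
  -- B's order/seen loop computes the union key list
  have horder : ((pvToIndex mi).keys.foldl (fun (p : List String × PySem.Set String) t =>
        if PySem.Set.contains p.2 t then p else (p.1 ++ [t], PySem.Set.add p.2 t))
        ((pvToIndex ia).keys, PySem.Set.ofList (pvToIndex ia).keys)).1
      = PySem.Set.update (pvToIndex ia).keys (pvToIndex mi).keys := by
    rw [ofList_self_of_nodup _ hAnd, pair_fold]
  rw [horder]
  -- A's result dict: keys and per-key values
  have hRkeys : ((pvToIndex mi).items.foldl
        (fun m td => m.modify td.1 PySem.Dict.empty (fun dd => dd.update td.2.items))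
        (pvToIndex ia)).keys = PySem.Set.update (pvToIndex ia).keys (pvToIndex mi).keys := by
    rw [PySem.Dict.keys_foldl_modify_key (pvToIndex mi).items (fun p => p.1) PySem.Dict.empty
      (fun _ td => fun dd => dd.update td.2.items) (pvToIndex ia)]
    rfl
  have hRnd := PySem.Dict.nodup_keys_foldl_modify_key (pvToIndex mi).items (fun p => p.1)
    PySem.Dict.empty (fun _ td => fun dd => dd.update td.2.items) (pvToIndex ia) hAnd
  rw [PySem.Dict.items_eq_map_keys _ hRnd PySem.Dict.empty, hRkeys]
  -- B's outer dict rebuilds its distinct-key pair list unchanged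
  have hond : (PySem.Set.update (pvToIndex ia).keys (pvToIndex mi).keys).Nodup :=
    nodup_set_update _ _ hAnd
  have hcomp : ∀ (f : String → PySem.Dict String Int) (l : List String),
      List.map ((fun (p : String × PySem.Dict String Int) => p.1) ∘ (fun t => (t, f t))) l = l := by
    intro f l
    induction l with
    | nil => rfl
    | cons a l ih => simp only [List.map_cons, Function.comp_apply, ih]
  rw [items_ofList_of_nodup _ (by rw [List.map_map, hcomp]; exact hond)]
  rw [List.map_map, List.map_map]
  exact List.map_congr_left (fun t _ => by
    simp only [Function.comp]
    rw [second_pass_getD, inner_copy])
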